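-- pv_equiv track=rewrite | github.com/NykoEugen/Montal_Home | furniture/management/commands/import_supplier_furniture.py | _resolve_target_categories
-- ===== SOURCE A (Python) =====
-- from typing import Dict, Iterable, List, Optional, Tuple
--
-- def _resolve_target_categories(
--
--     lookup: Dict[str, str],
--     allowed_names: Iterable[str],
--     forced_ids: Optional[Iterable[str]] = None,
-- ) -> Dict[str, str]:
--     normalized_allowed = {name.strip().lower() for name in allowed_names if name}
--     forced_set = {str(value) for value in forced_ids or []}
--     resolved: Dict[str, str] = {}
--     for category_id, name in lookup.items():
--         normalized_name = name.strip().lower()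
--         if normalized_name in normalized_allowed or category_id in forced_set:
--             resolved[category_id] = name
--     return resolved
-- ===== SOURCE B (Python) =====
-- def _resolve_target_categories(lookup, allowed_names, forced_ids=None):
--     # Reverse index: normalized name -> list of category ids with that name.
--     index = {}
--     for category_id, name in lookup.items():
--         index.setdefault(name.strip().lower(), []).append(category_id)
--     matched = set()
--     for name in allowed_names:
--         if name:
--             matched.update(index.get(name.strip().lower(), []))
--     matched.update(str(value) for value in forced_ids or [])
--     return {category_id: name for category_id, name in lookup.items() if category_id in matched}
-- ===== Notes on version B (the rewrite author's own statement) =====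
-- stated objective: alternative
-- what changed: Instead of testing each lookup entry against a normalized allowed-name set, B builds a reverse index from normalized name to category ids, collects the matched id set from allowed_names and forced_ids, and keeps the lookup entries whose id is in that set.
import Mathlib
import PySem

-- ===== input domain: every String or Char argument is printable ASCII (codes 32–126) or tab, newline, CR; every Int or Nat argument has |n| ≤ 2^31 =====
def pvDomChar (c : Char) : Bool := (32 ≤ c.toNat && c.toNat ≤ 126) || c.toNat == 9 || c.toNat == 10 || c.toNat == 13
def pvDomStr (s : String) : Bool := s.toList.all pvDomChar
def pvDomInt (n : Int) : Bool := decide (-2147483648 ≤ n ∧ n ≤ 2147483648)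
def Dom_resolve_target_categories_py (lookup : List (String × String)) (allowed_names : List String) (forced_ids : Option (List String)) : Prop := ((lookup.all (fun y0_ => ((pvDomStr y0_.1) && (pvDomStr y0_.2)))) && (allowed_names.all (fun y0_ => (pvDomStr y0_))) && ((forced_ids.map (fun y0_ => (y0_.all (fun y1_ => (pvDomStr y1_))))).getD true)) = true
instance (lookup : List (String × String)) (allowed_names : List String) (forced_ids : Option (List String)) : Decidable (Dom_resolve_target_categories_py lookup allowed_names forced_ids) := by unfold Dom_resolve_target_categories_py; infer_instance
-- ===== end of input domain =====

-- B (alternative decomposition): instead of testing every lookup entry against the allowed-name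
-- set, B builds a reverse index normalized-name → ids once, collects the matched id set from
-- allowed_names and forced_ids, and keeps the lookup entries whose id is in that set.

-- shared helper: name.strip().lower()
def pvNorm (s : String) : String := PySem.Str.lower (PySem.Str.strip s)

-- ===== PORT A =====
def resolve_target_categories_py (lookup : List (String × String)) (allowed_names : List String) (forced_ids : Option (List String)) : List (String × String) :=
  let normalized_allowed : PySem.Set String :=
    PySem.Set.ofList ((allowed_names.filter (fun n => !(n == ""))).map (fun n => pvNorm n))
  let forced_set : PySem.Set String := PySem.Set.ofList (forced_ids.getD [])
  let resolved : PySem.Dict String String :=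
    (PySem.Dict.ofList lookup).items.foldl
      (fun d p =>
        if PySem.Set.contains normalized_allowed (pvNorm p.2) || PySem.Set.contains forced_set p.1
        then d.insert p.1 p.2 else d)
      PySem.Dict.empty
  resolved.items

-- ===== PORT B =====
def resolve_target_categories_py_alt (lookup : List (String × String)) (allowed_names : List String) (forced_ids : Option (List String)) : List (String × String) :=
  let items := (PySem.Dict.ofList lookup).items
  let index : PySem.Dict String (List String) :=
    items.foldl (fun d p => d.modify (pvNorm p.2) [] (fun l => l ++ [p.1])) PySem.Dict.empty
  let matched : PySem.Set String :=
    allowed_names.foldl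
      (fun s n => if n == "" then s else PySem.Set.update s (index.getD (pvNorm n) []))
      PySem.Set.empty
  let matched2 : PySem.Set String := PySem.Set.update matched (forced_ids.getD [])
  items.filter (fun p => PySem.Set.contains matched2 p.1)

-- ===== PRECONDITION & SPEC =====
def Spec_resolve_target_categories_py (lookup : List (String × String)) (allowed_names : List String) (forced_ids : Option (List String)) (out : List (String × String)) : Prop := out = resolve_target_categories_py_alt lookup allowed_names forced_ids
instance (lookup : List (String × String)) (allowed_names : List String) (forced_ids : Option (List String)) (out : List (String × String)) : Decidable (Spec_resolve_target_categories_py lookup allowed_names forced_ids out) := by unfold Spec_resolve_target_categories_py; infer_instance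

-- ===== CLAIM (what is proved, stated in full; the proofs are below) =====
def Claim_equal_resolve_target_categories_py : Prop := ∀ (lookup : List (String × String)) (allowed_names : List String) (forced_ids : Option (List String)), Dom_resolve_target_categories_py lookup allowed_names forced_ids → Spec_resolve_target_categories_py lookup allowed_names forced_ids (resolve_target_categories_py lookup allowed_names forced_ids)

-- ===== LEMMAS AND PROOFS =====

-- membership in B's "matched" fold over allowed_names
theorem pv_mem_foldl_update_if (l : List String) (g : String → List String) (s : PySem.Set String) (x : String) :
    (x ∈ l.foldl (fun s n => if n == "" then s else PySem.Set.update s (g n)) s) ↔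
      x ∈ s ∨ ∃ n ∈ l, ¬(n = "") ∧ x ∈ g n := by
  induction l generalizing s with
  | nil => simp
  | cons h t ih =>
    simp only [List.foldl_cons]
    by_cases hh : h = ""
    · rw [if_pos (by simp [hh]), ih]
      constructor
      · rintro (hx | ⟨n, hn, hne, hx⟩)
        · exact Or.inl hx
        · exact Or.inr ⟨n, List.mem_cons_of_mem _ hn, hne, hx⟩
      · rintro (hx | ⟨n, hn, hne, hx⟩)
        · exact Or.inl hx
        · rcases List.mem_cons.mp hn with rfl | hn
          · exact (hne hh).elim
          · exact Or.inr ⟨n, hn, hne, hx⟩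
    · rw [if_neg (by simp [hh]), ih, PySem.Set.mem_update]
      constructor
      · rintro (⟨hx | hx⟩ | ⟨n, hn, hne, hx⟩)
        · exact Or.inl hx
        · exact Or.inr ⟨h, by simp, hh, hx⟩
        · exact Or.inr ⟨n, List.mem_cons_of_mem _ hn, hne, hx⟩
      · rintro (hx | ⟨n, hn, hne, hx⟩)
        · exact Or.inl (Or.inl hx)
        · rcases List.mem_cons.mp hn with rfl | hn
          · exact Or.inl (Or.inr hx)
          · exact Or.inr ⟨n, hn, hne, hx⟩

-- A's insert-or-skip loop over the (nodup-keyed) items just filters them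
theorem pv_foldl_insert_if_items (l : List (String × String)) (q : String × String → Bool)
    (hnd : (l.map Prod.fst).Nodup) :
    ((l.foldl (fun d p => if q p then d.insert p.1 p.2 else d) (PySem.Dict.empty : PySem.Dict String String)).items)
      = l.filter q := by
  rw [PySem.List.foldl_if_eq_foldl_filter]
  have hfresh : ∀ a ∈ l.filter q, (PySem.Dict.empty : PySem.Dict String String).contains a.1 = false := by
    intro a _; simp
  have hnd' : ((l.filter q).map Prod.fst).Nodup :=
    List.Nodup.sublist (List.Sublist.map Prod.fst List.filter_sublist) hnd
  have h := PySem.Dict.items_foldl_insert_fresh (l := l.filter q) (k := Prod.fst) (v := Prod.snd)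
      (d := PySem.Dict.empty) hfresh hnd'
  simpa using h

theorem resolve_py_spec_aux (lookup : List (String × String)) (allowed_names : List String) (forced_ids : Option (List String)) :
    resolve_target_categories_py lookup allowed_names forced_ids
      = resolve_target_categories_py_alt lookup allowed_names forced_ids := by
  have hnd : (((PySem.Dict.ofList lookup).items).map Prod.fst).Nodup := PySem.Dict.nodup_keys_ofList lookup
  have hinj := List.inj_on_of_nodup_map hnd
  simp only [resolve_target_categories_py, resolve_target_categories_py_alt]
  rw [pv_foldl_insert_if_items _ _ hnd]
  apply List.filter_congr
  intro p hp
  rw [Bool.eq_iff_iff]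
  simp only [Bool.or_eq_true, PySem.Set.contains_iff]
  rw [PySem.Set.mem_update, pv_mem_foldl_update_if]
  have hindex : ∀ c, ((PySem.Dict.ofList lookup).items.foldl
      (fun d p => d.modify (pvNorm p.2) [] (fun l => l ++ [p.1]))
      (PySem.Dict.empty : PySem.Dict String (List String))).getD c []
      = (((PySem.Dict.ofList lookup).items.map (fun p => (pvNorm p.2, p.1))).filter
          (fun q => q.1 == c)).map (·.2) := by
    intro c
    rw [← List.foldl_map (f := fun p : String × String => (pvNorm p.2, p.1))
        (g := fun (d : PySem.Dict String (List String)) (q : String × String) => d.modify q.1 [] (fun l => l ++ [q.2]))]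
    simpa using PySem.Dict.getD_foldl_modify_append
      (l := (PySem.Dict.ofList lookup).items.map (fun p => (pvNorm p.2, p.1)))
      (d := (PySem.Dict.empty : PySem.Dict String (List String))) (c := c)
  have key : ∀ n : String, (p.1 ∈ (((PySem.Dict.ofList lookup).items.map (fun p => (pvNorm p.2, p.1))).filter
      (fun q => q.1 == pvNorm n)).map (·.2)) ↔ pvNorm p.2 = pvNorm n := by
    intro n
    constructor
    · intro h
      simp only [List.mem_map, List.mem_filter, beq_iff_eq] at h
      obtain ⟨a, ⟨⟨p', hp', hfa⟩, hkeyeq⟩, hsnd⟩ := h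
      have h1 : pvNorm p'.2 = pvNorm n := by rw [← hfa] at hkeyeq; exact hkeyeq
      have h2 : p'.1 = p.1 := by rw [← hfa] at hsnd; exact hsnd
      have : p' = p := hinj hp' hp h2
      rw [← this]; exact h1
    · intro h
      simp only [List.mem_map, List.mem_filter, beq_iff_eq]
      exact ⟨(pvNorm p.2, p.1), ⟨⟨p, hp, rfl⟩, h⟩, rfl⟩
  simp only [hindex, key, PySem.Set.mem_ofList, List.mem_map, List.mem_filter,
    Bool.not_eq_eq_eq_not, Bool.not_true, beq_eq_false_iff_ne, ne_eq,
    PySem.Set.empty, List.not_mem_nil, false_or]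
  constructor
  · rintro (⟨n, ⟨hn, hne⟩, hnorm⟩ | hf)
    · exact Or.inl ⟨n, hn, hne, hnorm.symm⟩
    · exact Or.inr hf
  · rintro (⟨n, hn, hne, hnorm⟩ | hf)
    · exact Or.inl ⟨n, ⟨hn, hne⟩, hnorm.symm⟩
    · exact Or.inr hf

-- ===== VERDICT (by name: the statement is the Claim_ definition above) =====
theorem resolve_target_categories_py_spec : Claim_equal_resolve_target_categories_py := by
  intro lookup allowed_names forced_ids _
  exact resolve_py_spec_aux lookup allowed_names forced_ids
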